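-- pv_equiv track=rewrite | github.com/JeffSouop/ProjetCrytography | Crypto/doublons.py | batch_gcd
-- ===== SOURCE A (Python) =====
-- import math
--
-- def batch_gcd(keys):
--     n = len(keys)
--     gcds = [0] * n
--     prod = 1
--     for i in range(n):
--         prod *= keys[i][0]
--     for i in range(n):
--         mod = keys[i][0]
--         gcds[i] = math.gcd(prod // mod, mod)
--     return gcds
-- ===== SOURCE B (Python) =====
-- import math
--
-- def batch_gcd(keys):
--     mods = [k[0] for k in keys]
--     # suffix[j] (after reversing) = product of mods[j:]
--     suffix = [1]
--     for m in reversed(mods):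
--         suffix.append(m * suffix[-1])
--     suffix.reverse()
--     out = []
--     pref = 1
--     for m, s in zip(mods, suffix[1:]):
--         out.append(math.gcd(pref * s, m))
--         pref *= m
--     return out
-- ===== Notes on version B (the rewrite author's own statement) =====
-- stated objective: alternative
-- what changed: B replaces A's single global product followed by one exact big-integer division per key with prefix and suffix product accumulation, so no division is performed at all; as a consequence B also returns a value (gcd with 0) where A divides by a zero key.
-- crash fix: On inputs whose inner lists are all nonempty but where some key head is 0, A raises ZeroDivisionError (prod // 0) while B returns the list of gcds, with gcd(product of the other keys, 0) at the zero positions. — e.g. on batch_gcd([[0]]): A raises ZeroDivisionError, B returns [1]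
import Mathlib
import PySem

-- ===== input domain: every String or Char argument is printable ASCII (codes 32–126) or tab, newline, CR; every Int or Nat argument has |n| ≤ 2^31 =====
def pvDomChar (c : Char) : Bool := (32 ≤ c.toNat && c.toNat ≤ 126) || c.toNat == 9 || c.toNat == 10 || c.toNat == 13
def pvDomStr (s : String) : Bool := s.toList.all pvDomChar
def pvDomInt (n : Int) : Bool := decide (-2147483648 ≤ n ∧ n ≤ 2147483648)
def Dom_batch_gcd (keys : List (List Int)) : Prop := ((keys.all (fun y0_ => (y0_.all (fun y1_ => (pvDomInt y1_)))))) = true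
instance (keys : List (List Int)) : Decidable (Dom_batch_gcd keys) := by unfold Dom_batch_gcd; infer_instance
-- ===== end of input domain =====

-- B differs from A only in structure: prefix/suffix products instead of one global
-- product plus a big-integer division per key (objective: alternative, no division).

-- ===== PORT A =====
-- first loop: prod *= keys[i][0]; second loop: gcds[i] = math.gcd(prod // mod, mod)
def batch_gcd (keys : List (List Int)) : List Int :=
  let prod : Int := keys.foldl (fun p k => p * k.headD 0) 1
  keys.map (fun k => ((Int.gcd (PySem.Int.floordiv prod (k.headD 0)) (k.headD 0) : Nat) : Int))

-- ===== PORT B =====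
-- loop over zip(mods, suffix[1:]) carrying the running prefix product
def bgAltGo : List Int → List Int → Int → List Int
  | m :: ms, s :: ss, pref => ((Int.gcd (pref * s) m : Nat) : Int) :: bgAltGo ms ss (pref * m)
  | _, _, _ => []

def batch_gcd_alt (keys : List (List Int)) : List Int :=
  let mods := keys.map (fun k => k.headD 0)
  -- 'append m*suffix[-1] then reverse at the end' is rendered as building the list front-first
  let suffix := mods.reverse.foldl (fun acc m => (m * acc.headD 1) :: acc) [1]
  bgAltGo mods (suffix.drop 1) 1

-- ===== PRECONDITION & SPEC =====
-- Pre_ excludes exactly the inputs where A raises: an empty inner list (IndexError on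
-- keys[i][0]) or a key head equal to 0 (ZeroDivisionError on prod // 0).
def Pre_batch_gcd (keys : List (List Int)) : Prop :=
  ∀ k ∈ keys, k ≠ [] ∧ k.headD 0 ≠ 0
instance (keys : List (List Int)) : Decidable (Pre_batch_gcd keys) := by
  unfold Pre_batch_gcd; infer_instance
def pvWitness_batch_gcd : List (List Int) := [[6], [10], [15]]

-- On inputs whose inner lists are all nonempty but some key head is 0, A raises
-- ZeroDivisionError (prod // 0) while B returns the gcd list, with
-- gcd(product of the other keys, 0) at the zero positions.
def Raises_batch_gcd (keys : List (List Int)) : Prop :=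
  (∀ k ∈ keys, k ≠ []) ∧ ∃ k ∈ keys, k.headD 0 = 0
instance (keys : List (List Int)) : Decidable (Raises_batch_gcd keys) := by
  unfold Raises_batch_gcd; infer_instance
def pvRaiseWitness_batch_gcd : List (List Int) := [[0]]
def pvRaiseWitnessOut_batch_gcd : List Int := [1]

def Spec_batch_gcd (keys : List (List Int)) (out : List Int) : Prop := out = batch_gcd_alt keys
instance (keys : List (List Int)) (out : List Int) : Decidable (Spec_batch_gcd keys out) := by unfold Spec_batch_gcd; infer_instance

-- ===== CLAIM (what is proved, stated in full; the proofs are below) =====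
def Claim_equal_batch_gcd : Prop := ∀ (keys : List (List Int)), Dom_batch_gcd keys → Pre_batch_gcd keys → Spec_batch_gcd keys (batch_gcd keys)
def Claim_raises_batch_gcd : Prop := (∀ (keys : List (List Int)), Dom_batch_gcd keys → Raises_batch_gcd keys → ¬ Pre_batch_gcd keys) ∧ (Dom_batch_gcd (pvRaiseWitness_batch_gcd) ∧ Raises_batch_gcd (pvRaiseWitness_batch_gcd) ∧ batch_gcd_alt (pvRaiseWitness_batch_gcd) = pvRaiseWitnessOut_batch_gcd)

-- ===== LEMMAS AND PROOFS =====

-- the suffix list B builds, written as the structural recursion it folds to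
def bgSuffix : List Int → List Int
  | [] => [1]
  | m :: ms => (m * (bgSuffix ms).headD 1) :: bgSuffix ms

lemma bgSuffix_eq_fold (l : List Int) :
    l.reverse.foldl (fun acc m => (m * acc.headD 1) :: acc) [1] = bgSuffix l := by
  rw [List.foldl_reverse]
  induction l with
  | nil => rfl
  | cons m ms ih => rw [List.foldr_cons, ih]; rfl

lemma bgSuffix_headD (l : List Int) : (bgSuffix l).headD 1 = l.prod := by
  induction l with
  | nil => rfl
  | cons m ms ih =>
    show ((m * (bgSuffix ms).headD 1) :: bgSuffix ms).headD 1 = (m :: ms).prod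
    rw [List.headD_cons, ih, List.prod_cons]

lemma bgSuffix_shape (l : List Int) : bgSuffix l = l.prod :: (bgSuffix l).drop 1 := by
  cases l with
  | nil => rfl
  | cons m ms =>
    show ((m * (bgSuffix ms).headD 1) :: bgSuffix ms)
        = (m :: ms).prod :: (((m * (bgSuffix ms).headD 1) :: bgSuffix ms)).drop 1
    rw [bgSuffix_headD, List.prod_cons, List.drop_succ_cons, List.drop_zero]

lemma floordiv_mul_cancel (q m : Int) (hm : m ≠ 0) : PySem.Int.floordiv (q * m) m = q := by
  have h0 : PySem.Int.mod (q * m) m = 0 :=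
    (PySem.Int.mod_eq_zero_iff_dvd (q * m) m).mpr (dvd_mul_left m q)
  have := PySem.Int.floordiv_mul_add_mod (q * m) m
  rw [h0, add_zero] at this
  exact mul_right_cancel₀ hm this

lemma foldl_mul_eq_prod (l : List Int) (a : Int) : l.foldl (· * ·) a = a * l.prod := by
  induction l generalizing a with
  | nil => simp
  | cons x xs ih => simp [List.foldl_cons, ih, mul_assoc]

lemma bgAltGo_eq (mods : List Int) : ∀ (pref P : Int),
    (∀ m ∈ mods, m ≠ 0) → P = pref * mods.prod →
    bgAltGo mods ((bgSuffix mods).drop 1) pref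
      = mods.map (fun m => ((Int.gcd (PySem.Int.floordiv P m) m : Nat) : Int)) := by
  induction mods with
  | nil => intro pref P _ _; rfl
  | cons m ms ih =>
    intro pref P hnz hP
    have hm : m ≠ 0 := hnz m (List.mem_cons_self ..)
    have hdrop : (bgSuffix (m :: ms)).drop 1 = ms.prod :: (bgSuffix ms).drop 1 := by
      show (((m * (bgSuffix ms).headD 1) :: bgSuffix ms)).drop 1 = ms.prod :: (bgSuffix ms).drop 1
      rw [List.drop_succ_cons, List.drop_zero]; exact bgSuffix_shape ms
    rw [hdrop]
    show ((Int.gcd (pref * ms.prod) m : Nat) : Int) :: bgAltGo ms ((bgSuffix ms).drop 1) (pref * m) = _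
    have hP' : P = (pref * ms.prod) * m := by rw [hP, List.prod_cons]; ring
    have hhead : PySem.Int.floordiv P m = pref * ms.prod := by
      rw [hP']; exact floordiv_mul_cancel _ _ hm
    rw [ih (pref * m) P (fun x hx => hnz x (List.mem_cons_of_mem _ hx))
          (by rw [hP, List.prod_cons]; ring)]
    simp [hhead]

-- ===== VERDICT (by name: the statement is the Claim_ definition above) =====
lemma batch_gcd_def (keys : List (List Int)) : batch_gcd keys
    = keys.map (fun k => ((Int.gcd (PySem.Int.floordiv (keys.foldl (fun p k => p * k.headD 0) 1) (k.headD 0)) (k.headD 0) : Nat) : Int)) := rfl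

lemma batch_gcd_alt_def (keys : List (List Int)) : batch_gcd_alt keys
    = bgAltGo (keys.map (fun k => k.headD 0))
        (((keys.map (fun k => k.headD 0)).reverse.foldl (fun acc m => (m * acc.headD 1) :: acc) [1]).drop 1) 1 := rfl

theorem batch_gcd_spec : Claim_equal_batch_gcd := by
  intro keys _ hpre
  unfold Spec_batch_gcd
  rw [batch_gcd_def, batch_gcd_alt_def, bgSuffix_eq_fold]
  have hnz : ∀ m ∈ keys.map (fun k => k.headD 0), m ≠ 0 := by
    intro m hm
    rcases List.mem_map.mp hm with ⟨k, hk, rfl⟩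
    exact (hpre k hk).2
  have hfold : keys.foldl (fun p k => p * k.headD 0) 1
      = (keys.map (fun k => k.headD 0)).prod := by
    rw [← List.foldl_map]
    rw [foldl_mul_eq_prod]; ring
  rw [bgAltGo_eq _ 1 (keys.foldl (fun p k => p * k.headD 0) 1) hnz (by rw [hfold]; ring)]
  rw [List.map_map]
  rfl

@[simp]
theorem batch_gcd_raises : Claim_raises_batch_gcd := by
  unfold Claim_raises_batch_gcd
  constructor
  · intro keys _ hr hpre
    rcases hr.2 with ⟨k, hk, h0⟩
    exact (hpre k hk).2 h0
  · exact ⟨by decide, by decide, by decide⟩
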